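-- pv_equiv track=rewrite | github.com/aintelope-london/attention-schema-theory-experiment | aintelope/analytics/metrics.py | _episode_windows
-- ===== SOURCE A (Python) =====
-- def _episode_windows(episodes, n_windows):
--     eps = sorted(set(episodes))
--     n_windows = min(n_windows, len(eps))
--     size = max(1, len(eps) // n_windows)
--     windows = []
--     for i in range(n_windows):
--         start = i * size
--         end = start + size if i < n_windows - 1 else len(eps)
--         label = f"ep {eps[start]}–{eps[end - 1]}"
--         windows.append((label, frozenset(eps[start:end])))
--     return windows
-- ===== SOURCE B (Python) =====
-- def _episode_windows(episodes, n_windows):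
--     eps = sorted(set(episodes))
--     n_windows = min(n_windows, len(eps))
--     size = max(1, len(eps) // n_windows)
--     windows = []
--     rest = eps
--     k = n_windows
--     while k > 0:
--         chunk = rest if k == 1 else rest[:size]
--         windows.append((f"ep {chunk[0]}\u2013{chunk[-1]}", frozenset(chunk)))
--         rest = rest[size:]
--         k -= 1
--     return windows
-- ===== Notes on version B (the rewrite author's own statement) =====
-- stated objective: alternative
-- what changed: Instead of looping over window indices and slicing eps by precomputed start/end boundaries, B iteratively consumes the sorted-unique episode list with a while loop, peeling off a size-element chunk per window (the last window takes the whole remainder); Pre_ excludes only the inputs where both programs raise ZeroDivisionError (effective window count zero).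
import Mathlib
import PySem

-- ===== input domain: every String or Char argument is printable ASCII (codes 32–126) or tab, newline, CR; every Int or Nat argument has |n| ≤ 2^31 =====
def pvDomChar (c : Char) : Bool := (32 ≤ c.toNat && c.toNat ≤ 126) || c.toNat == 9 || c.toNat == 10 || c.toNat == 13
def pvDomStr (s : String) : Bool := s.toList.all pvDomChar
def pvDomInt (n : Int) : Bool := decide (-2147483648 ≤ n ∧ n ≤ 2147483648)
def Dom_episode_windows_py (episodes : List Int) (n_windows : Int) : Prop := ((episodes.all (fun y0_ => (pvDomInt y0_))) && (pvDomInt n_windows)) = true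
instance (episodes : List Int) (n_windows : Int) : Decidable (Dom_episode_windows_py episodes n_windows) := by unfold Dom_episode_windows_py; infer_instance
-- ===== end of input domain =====

-- B replaces A's loop over window indices (slicing eps by precomputed start/end boundaries) with a
-- while loop that consumes the sorted-unique episode list chunk by chunk, peeling size elements
-- per window and handing the rest to the last one; same cost, different decomposition ("alternative").


-- ===== PORT A =====
-- eps[start] / eps[end-1] are always in range when the Python returns (inside Pre_); pyGetD's
-- default 0 is never used there.
def episode_windows_py (episodes : List Int) (n_windows : Int) : List (String × List Int) :=
  let eps : List Int := PySem.List.sorted (PySem.Set.ofList episodes) (fun x => x) false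
  let n : Int := min n_windows (eps.length : Int)
  let size : Int := max 1 (PySem.Int.floordiv (eps.length : Int) n)
  (PySem.List.pyRange 0 n 1).foldl (fun windows i =>
      let start := i * size
      let stop := if i < n - 1 then start + size else (eps.length : Int)
      windows ++ [("ep " ++ PySem.Int.toStr (PySem.List.pyGetD eps start 0) ++ "–" ++
                     PySem.Int.toStr (PySem.List.pyGetD eps (stop - 1) 0),
                   PySem.Set.ofList (PySem.List.slice eps (some start) (some stop)))]) []

-- ===== PORT B =====
-- build(rest, k): inner recursion of Source B; chunk[0] / chunk[-1] are always in range when the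
-- Python returns (inside Pre_), so pyGetD's default 0 is never used.
def pvLoop (size : Int) (windows : List (String × List Int)) (rest : List Int) (k : Int) :
    List (String × List Int) :=
  if _hk : 0 < k then
    let chunk := if k = 1 then rest else PySem.List.slice rest none (some size)
    let label := "ep " ++ PySem.Int.toStr (PySem.List.pyGetD chunk 0 0) ++ "–" ++
                 PySem.Int.toStr (PySem.List.pyGetD chunk (-1) 0)
    pvLoop size (windows ++ [(label, PySem.Set.ofList chunk)])
      (PySem.List.slice rest (some size) none) (k - 1)
  else windows
termination_by k.toNat
decreasing_by simp_wf; omega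

def episode_windows_py_alt (episodes : List Int) (n_windows : Int) : List (String × List Int) :=
  let eps : List Int := PySem.List.sorted (PySem.Set.ofList episodes) (fun x => x) false
  let n : Int := min n_windows (eps.length : Int)
  let size : Int := max 1 (PySem.Int.floordiv (eps.length : Int) n)
  pvLoop size [] eps n

-- ===== PRECONDITION & SPEC =====
-- Pre_ excludes exactly the inputs where A (and B alike) raises ZeroDivisionError:
-- min(n_windows, len(set(episodes))) == 0, i.e. n_windows == 0, or episodes empty with n_windows > 0.
def Pre_episode_windows_py (episodes : List Int) (n_windows : Int) : Prop :=
  n_windows ≠ 0 ∧ (episodes ≠ [] ∨ n_windows < 0)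
instance (episodes : List Int) (n_windows : Int) : Decidable (Pre_episode_windows_py episodes n_windows) := by unfold Pre_episode_windows_py; infer_instance
def pvWitness_episode_windows_py : List Int × Int := ([1, 2, 3], 2)

def Spec_episode_windows_py (episodes : List Int) (n_windows : Int) (out : List (String × List Int)) : Prop := out = episode_windows_py_alt episodes n_windows
instance (episodes : List Int) (n_windows : Int) (out : List (String × List Int)) : Decidable (Spec_episode_windows_py episodes n_windows out) := by unfold Spec_episode_windows_py; infer_instance

-- ===== CLAIM (what is proved, stated in full; the proofs are below) =====
def Claim_equal_episode_windows_py : Prop := ∀ (episodes : List Int) (n_windows : Int), Dom_episode_windows_py episodes n_windows → Pre_episode_windows_py episodes n_windows → Spec_episode_windows_py episodes n_windows (episode_windows_py episodes n_windows)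

-- ===== LEMMAS AND PROOFS =====

-- first and last element of a nonempty slice
lemma pv_slice_ends (eps : List Int) (a b : Int)
    (h0 : 0 ≤ a) (hab : a < b) (hbm : b ≤ (eps.length : Int)) :
    PySem.List.pyGetD (PySem.List.slice eps (some a) (some b)) 0 0
        = PySem.List.pyGetD eps a 0 ∧
    PySem.List.pyGetD (PySem.List.slice eps (some a) (some b)) (-1) 0
        = PySem.List.pyGetD eps (b - 1) 0 := by
  rw [PySem.List.slice_toNat _ h0 (by omega)]
  have halen : a < (eps.length : Int) := by omega
  have hlen : ((eps.drop a.toNat).take (b.toNat - a.toNat)).length = b.toNat - a.toNat := by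
    simp only [List.length_take, List.length_drop]
    omega
  have hne : (eps.drop a.toNat).take (b.toNat - a.toNat) ≠ [] := by
    intro h
    rw [h] at hlen
    simp at hlen
    omega
  constructor
  · rw [PySem.List.pyGetD_zero, PySem.List.pyGetD_eq_getElem _ _ h0 halen,
        List.getD_eq_getElem _ _ (by omega)]
    simp only [List.getElem_take, List.getElem_drop]
    congr 1
  · rw [PySem.List.pyGetD_neg_one _ _ hne, PySem.List.pyGetD_eq_getElem _ _ (by omega) (by omega),
        List.getLast_eq_getElem]
    simp only [List.getElem_take, List.getElem_drop]
    congr 1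
    omega

-- the chunk recursion of B produces exactly A's windows, from window n-m on
lemma pv_build_eq (eps : List Int) (n size : Int)
    (hsz : 1 ≤ size) (hns : n * size ≤ (eps.length : Int)) :
    ∀ m : ℕ, (m : Int) ≤ n → ∀ w : List (String × List Int),
      pvLoop size w (eps.drop (((n - m) * size).toNat)) (m : Int)
        = w ++ (PySem.List.pyRange (n - m) n 1).map (fun i =>
            ("ep " ++ PySem.Int.toStr (PySem.List.pyGetD eps (i * size) 0) ++ "–" ++
               PySem.Int.toStr (PySem.List.pyGetD eps
                 ((if i < n - 1 then i * size + size else (eps.length : Int)) - 1) 0),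
             PySem.Set.ofList (PySem.List.slice eps (some (i * size))
               (some (if i < n - 1 then i * size + size else (eps.length : Int)))))) := by
  intro m
  induction m with
  | zero =>
    intro _ w
    rw [pvLoop, PySem.List.pyRange_one_eq_nil (by omega)]
    simp
  | succ m ih =>
    intro hm w
    have hm' : (m : Int) ≤ n := by push_cast at hm ⊢; omega
    set i : Int := n - (m + 1 : ℕ) with hi
    have hi0 : 0 ≤ i := by rw [hi]; push_cast at hm ⊢; omega
    have hoff0 : 0 ≤ i * size := mul_nonneg hi0 (by omega)
    have hin : i < n := by rw [hi]; push_cast; omega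
    have hiend : (i + 1) * size ≤ (eps.length : Int) := by
      calc (i + 1) * size ≤ n * size := mul_le_mul_of_nonneg_right (by omega) (by omega)
        _ ≤ _ := hns
    have hoffle : i * size < (eps.length : Int) := by nlinarith
    -- the window end and its bounds
    set e : Int := if i < n - 1 then i * size + size else (eps.length : Int) with he
    have hee : i * size < e ∧ e ≤ (eps.length : Int) := by
      rw [he]; split_ifs with hc
      · exact ⟨by omega, by nlinarith⟩
      · exact ⟨hoffle, le_rfl⟩
    rw [pvLoop]
    have hk0 : (0 : Int) < ((m + 1 : ℕ) : Int) := by push_cast; omega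
    rw [dif_pos hk0]
    -- the chunk equals A's slice for window i
    have hchunk :
        (if ((m + 1 : ℕ) : Int) = 1 then eps.drop ((i * size).toNat)
          else PySem.List.slice (eps.drop ((i * size).toNat)) none (some size))
        = PySem.List.slice eps (some (i * size)) (some e) := by
      rw [PySem.List.slice_toNat _ hoff0 (by omega)]
      by_cases hm1 : m = 0
      · subst hm1
        rw [if_pos (by norm_num)]
        have hec : e = (eps.length : Int) := by
          rw [he, if_neg (by rw [hi]; push_cast; omega)]
        rw [hec, List.take_of_length_le (by
          simp only [List.length_drop, Int.toNat_natCast]; omega)]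
      · rw [if_neg (by push_cast; omega)]
        have hec : e = i * size + size := by
          rw [he, if_pos (by rw [hi]; push_cast; omega)]
        rw [PySem.List.slice_to _ (by omega), hec]
        congr 1
        omega
    -- the tail is the remaining suffix
    have htail : PySem.List.slice (eps.drop ((i * size).toNat)) (some size) none
        = eps.drop (((n - m) * size).toNat) := by
      rw [PySem.List.slice_from _ (by omega), List.drop_drop]
      congr 1
      have h1 : (n - (m : Int)) * size = i * size + size := by rw [hi]; push_cast; ring
      omega
    have hdrop : (((n - ((m + 1 : ℕ) : Int)) * size).toNat) = ((i * size).toNat) := by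
      rw [hi]
    rw [hdrop, hchunk, htail,
        show ((m + 1 : ℕ) : Int) - 1 = (m : Int) from by push_cast; ring, ih hm',
        PySem.List.pyRange_one_cons (show i < n from hin), List.map_cons,
        show i + 1 = n - (m : Int) from by rw [hi]; push_cast; ring]
    have hends := pv_slice_ends eps (i * size) e hoff0 hee.1 hee.2
    simp only [hends.1, hends.2, List.append_assoc, List.singleton_append]
    rw [he]

-- ===== VERDICT (by name: the statement is the Claim_ definition above) =====
theorem episode_windows_py_spec : Claim_equal_episode_windows_py := by
  intro episodes n_windows _hdom _hpre
  unfold Spec_episode_windows_py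
  simp only [episode_windows_py, episode_windows_py_alt]
  set eps : List Int := PySem.List.sorted (PySem.Set.ofList episodes) (fun x => x) false with heps
  set n : Int := min n_windows (eps.length : Int) with hn'
  by_cases hn : 1 ≤ n
  · have hnm : n ≤ (eps.length : Int) := min_le_right _ _
    have hfd1 : 1 ≤ PySem.Int.floordiv (eps.length : Int) n :=
      (PySem.Int.le_floordiv_iff_mul_le (by omega)).mpr (by omega)
    have hfdle : PySem.Int.floordiv (eps.length : Int) n * n ≤ (eps.length : Int) :=
      (PySem.Int.le_floordiv_iff_mul_le (by omega)).mp le_rfl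
    have hns : n * (max 1 (PySem.Int.floordiv (eps.length : Int) n)) ≤ (eps.length : Int) := by
      rw [max_eq_right hfd1, mul_comm]
      exact hfdle
    have hmain := pv_build_eq eps n (max 1 (PySem.Int.floordiv (eps.length : Int) n))
      (le_max_left _ _) hns n.toNat (by omega) []
    rw [show ((n.toNat : Int)) = n from by omega] at hmain
    rw [show n - n = 0 from by omega] at hmain
    simp only [Int.zero_mul, Int.toNat_zero, List.drop_zero] at hmain
    rw [hmain]
    rw [PySem.List.foldl_append_singleton_eq_map]
  · rw [PySem.List.pyRange_one_eq_nil (by omega), pvLoop, dif_neg (by omega)]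
    rfl
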